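-- pv_equiv track=rewrite | github.com/rjwharry/algorithm | programmers/oil-drilling/solution.py | solution
-- ===== SOURCE A (Python) =====
-- def bfs(land, visited, start_i, start_j):
--     count = 1
--     start = start_j
--     end = start_j
--
--     visited[start_i][start_j] = True
--     child_list = [(start_i, start_j)]
--     while len(child_list) > 0:
--         curr_i, curr_j = child_list[0]
--         del child_list[0]
--         if start > curr_j:
--             start = curr_j
--         if end < curr_j:
--             end = curr_j
--         # up
--         if (
--             curr_i - 1 >= 0
--             and not visited[curr_i - 1][curr_j]
--             and land[curr_i - 1][curr_j] == 1
--         ):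
--             child_list.append((curr_i - 1, curr_j))
--             visited[curr_i - 1][curr_j] = True
--             count += 1
--         # right
--         if (
--             curr_j + 1 < len(land[0])
--             and not visited[curr_i][curr_j + 1]
--             and land[curr_i][curr_j + 1] == 1
--         ):
--             child_list.append((curr_i, curr_j + 1))
--             visited[curr_i][curr_j + 1] = True
--             count += 1
--         # down
--         if (
--             curr_i + 1 < len(land)
--             and not visited[curr_i + 1][curr_j]
--             and land[curr_i + 1][curr_j] == 1
--         ):
--             child_list.append((curr_i + 1, curr_j))
--             visited[curr_i + 1][curr_j] = True
--             count += 1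
--         # left
--         if (
--             curr_j - 1 >= 0
--             and not visited[curr_i][curr_j - 1]
--             and land[curr_i][curr_j - 1] == 1
--         ):
--             child_list.append((curr_i, curr_j - 1))
--             visited[curr_i][curr_j - 1] = True
--             count += 1
--     return start, end, count
--
-- def solution(land):
--     visited = [[False for _ in range(len(land[0]))] for _ in range(len(land))]
--     oil_group = []
--
--     for col in range(len(land[0])):
--         for row in range(len(land)):
--             if not visited[row][col] and land[row][col] == 1:
--                 start, end, count = bfs(land, visited, row, col)
--                 oil_group.append((start, end, count))
--
--     drilled_list = [0] * len(land[0])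
--     for group in oil_group:
--         for idx in range(group[0], group[1] + 1):
--             drilled_list[idx] += group[2]
--     return max(drilled_list)
-- ===== SOURCE B (Python) =====
-- def solution(land):
--     n, m = len(land), len(land[0])
--     visited = set()
--     diff = [0] * (m + 1)
--     for col in range(m):
--         for row in range(n):
--             if (row, col) not in visited and land[row][col] == 1:
--                 visited.add((row, col))
--                 cells = [(row, col)]
--                 i = 0
--                 while i < len(cells):
--                     ci, cj = cells[i]
--                     i += 1
--                     for di, dj in ((-1, 0), (0, 1), (1, 0), (0, -1)):
--                         ni, nj = ci + di, cj + dj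
--                         if 0 <= ni < n and 0 <= nj < m and (ni, nj) not in visited and land[ni][nj] == 1:
--                             visited.add((ni, nj))
--                             cells.append((ni, nj))
--                 cols = [c for _, c in cells]
--                 s, e, cnt = min(cols), max(cols), len(cells)
--                 diff[s] += cnt
--                 diff[e + 1] -= cnt
--     out = []
--     run = 0
--     for j in range(m):
--         run += diff[j]
--         out.append(run)
--     return max(out)
-- ===== Notes on version B (the rewrite author's own statement) =====
-- stated objective: alternative
-- what changed: B accumulates each component's weight over its column span with a difference array swept once at the end (instead of A's per-group per-column inner accumulation loop), keeps visited cells in a set of coordinates instead of a Boolean matrix, replaces the del-list[0] queue by an index pointer over the growing cell list, folds the four neighbour checks into a direction-tuple loop, and derives (start, end, count) from the collected cell list via min/max/len instead of updating them inside the BFS loop; it trades A's matrix/list constant factors for set/tuple ones.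
import Mathlib
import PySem

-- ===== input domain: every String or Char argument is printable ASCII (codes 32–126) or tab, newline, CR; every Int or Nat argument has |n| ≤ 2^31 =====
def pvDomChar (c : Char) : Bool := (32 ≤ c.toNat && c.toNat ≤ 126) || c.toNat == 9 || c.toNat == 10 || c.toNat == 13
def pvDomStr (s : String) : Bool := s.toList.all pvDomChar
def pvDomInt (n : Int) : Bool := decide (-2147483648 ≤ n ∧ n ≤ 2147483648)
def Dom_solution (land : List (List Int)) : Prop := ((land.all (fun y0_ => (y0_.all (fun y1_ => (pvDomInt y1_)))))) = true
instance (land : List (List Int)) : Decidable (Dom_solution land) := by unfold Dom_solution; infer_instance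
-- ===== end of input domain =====

-- B replaces A's per-column accumulation loop by a difference array and A's Boolean
-- visited matrix by a set of coordinates (same BFS order, so the values coincide).

-- ===== PORT A =====
-- land[i][j] (only ever evaluated at indices the Python code has guarded, so getD is exact there)
def pvGet2 (land : List (List Int)) (i j : Nat) : Int := (land.getD i []).getD j 0
-- visited[i][j] on the Boolean matrix
def pvVGet (v : List (List Bool)) (i j : Nat) : Bool := (v.getD i []).getD j false
-- visited[i][j] = True
def pvVSet (v : List (List Bool)) (i j : Nat) : List (List Bool) := v.modify i (fun r => r.set j true)

-- the four neighbour blocks of bfs, in A's order, on the state (child_list, visited, count)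
def pvUpA (land : List (List Int)) (ci cj : Nat)
    (a : List (Nat × Nat) × List (List Bool) × Int) : List (Nat × Nat) × List (List Bool) × Int :=
  if 1 ≤ ci ∧ pvVGet a.2.1 (ci - 1) cj = false ∧ pvGet2 land (ci - 1) cj = 1 then
    (a.1 ++ [(ci - 1, cj)], pvVSet a.2.1 (ci - 1) cj, a.2.2 + 1)
  else a

def pvRightA (land : List (List Int)) (m ci cj : Nat)
    (a : List (Nat × Nat) × List (List Bool) × Int) : List (Nat × Nat) × List (List Bool) × Int :=
  if cj + 1 < m ∧ pvVGet a.2.1 ci (cj + 1) = false ∧ pvGet2 land ci (cj + 1) = 1 then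
    (a.1 ++ [(ci, cj + 1)], pvVSet a.2.1 ci (cj + 1), a.2.2 + 1)
  else a

def pvDownA (land : List (List Int)) (n ci cj : Nat)
    (a : List (Nat × Nat) × List (List Bool) × Int) : List (Nat × Nat) × List (List Bool) × Int :=
  if ci + 1 < n ∧ pvVGet a.2.1 (ci + 1) cj = false ∧ pvGet2 land (ci + 1) cj = 1 then
    (a.1 ++ [(ci + 1, cj)], pvVSet a.2.1 (ci + 1) cj, a.2.2 + 1)
  else a

def pvLeftA (land : List (List Int)) (ci cj : Nat)
    (a : List (Nat × Nat) × List (List Bool) × Int) : List (Nat × Nat) × List (List Bool) × Int :=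
  if 1 ≤ cj ∧ pvVGet a.2.1 ci (cj - 1) = false ∧ pvGet2 land ci (cj - 1) = 1 then
    (a.1 ++ [(ci, cj - 1)], pvVSet a.2.1 ci (cj - 1), a.2.2 + 1)
  else a

-- the while-loop of bfs (fuel only makes the recursion total; n*m+1 is always enough)
def pvBfsLoop (land : List (List Int)) (n m : Nat) (visited : List (List Bool))
    (child : List (Nat × Nat)) (start end_ : Nat) (count : Int) (fuel : Nat) :
    (Nat × Nat × Int) × List (List Bool) :=
  match fuel, child with
  | 0, _ => ((start, end_, count), visited)
  | _ + 1, [] => ((start, end_, count), visited)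
  | fuel + 1, (ci, cj) :: rest =>
    let start := if cj < start then cj else start
    let end_ := if end_ < cj then cj else end_
    let a := pvLeftA land ci cj (pvDownA land n ci cj (pvRightA land m ci cj (pvUpA land ci cj (rest, visited, count))))
    pvBfsLoop land n m a.2.1 a.1 start end_ a.2.2 fuel

def pvBfsA (land : List (List Int)) (n m : Nat) (visited : List (List Bool)) (si sj : Nat) :
    (Nat × Nat × Int) × List (List Bool) :=
  pvBfsLoop land n m (pvVSet visited si sj) [(si, sj)] sj sj 1 (n * m + 1)

-- body of the double scan over (col, row)
def pvScanA (land : List (List Int)) (n m : Nat)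
    (st : List (List Bool) × List (Nat × Nat × Int)) (col row : Nat) :
    List (List Bool) × List (Nat × Nat × Int) :=
  if pvVGet st.1 row col = false ∧ pvGet2 land row col = 1 then
    (let r := pvBfsA land n m st.1 row col; (r.2, st.2 ++ [r.1]))
  else st

-- drilled_list accumulation for one group
def pvDrillA (g : Nat × Nat × Int) (d : List Int) : List Int :=
  (List.range' g.1 (g.2.1 + 1 - g.1)).foldl (fun d idx => d.modify idx (· + g.2.2)) d

def solution (land : List (List Int)) : Int :=
  let n := land.length
  let m := (land.headD []).length
  let visited : List (List Bool) := (List.range n).map (fun _ => (List.range m).map (fun _ => false))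
  let res := (List.range m).foldl (fun st col =>
      (List.range n).foldl (fun st row => pvScanA land n m st col row) st)
    (visited, ([] : List (Nat × Nat × Int)))
  let drilled := res.2.foldl (fun d g => pvDrillA g d) (List.replicate m (0 : Int))
  (PySem.List.max? drilled (fun x => x)).getD 0

-- ===== PORT B =====
def pvDirs : List (Int × Int) := [(-1, 0), (0, 1), (1, 0), (0, -1)]

-- one direction of B's neighbour loop, on the state (cells, visited-set)
def pvFloodStep (land : List (List Int)) (n m : Nat) (ci cj : Nat)
    (st : List (Nat × Nat) × PySem.Set (Nat × Nat)) (d : Int × Int) :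
    List (Nat × Nat) × PySem.Set (Nat × Nat) :=
  if 0 ≤ (ci : Int) + d.1 ∧ (ci : Int) + d.1 < (n : Int) ∧ 0 ≤ (cj : Int) + d.2 ∧ (cj : Int) + d.2 < (m : Int) ∧
      PySem.Set.contains st.2 (((ci : Int) + d.1).toNat, ((cj : Int) + d.2).toNat) = false ∧
      pvGet2 land ((ci : Int) + d.1).toNat ((cj : Int) + d.2).toNat = 1 then
    (st.1 ++ [(((ci : Int) + d.1).toNat, ((cj : Int) + d.2).toNat)],
     PySem.Set.add st.2 (((ci : Int) + d.1).toNat, ((cj : Int) + d.2).toNat))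
  else st

-- B's while loop: cells doubles as FIFO queue (read position i) and as the component list
def pvFloodLoop (land : List (List Int)) (n m : Nat) (cells : List (Nat × Nat)) (i : Nat)
    (vis : PySem.Set (Nat × Nat)) (fuel : Nat) : List (Nat × Nat) × PySem.Set (Nat × Nat) :=
  match fuel with
  | 0 => (cells, vis)
  | fuel + 1 =>
    if i < cells.length then
      let c := cells.getD i (0, 0)
      let st := pvDirs.foldl (pvFloodStep land n m c.1 c.2) (cells, vis)
      pvFloodLoop land n m st.1 (i + 1) st.2 fuel
    else (cells, vis)

-- body of B's double scan: flood the component, add its weight to the difference array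
def pvScanB (land : List (List Int)) (n m : Nat)
    (st : PySem.Set (Nat × Nat) × List Int) (col row : Nat) :
    PySem.Set (Nat × Nat) × List Int :=
  if PySem.Set.contains st.1 (row, col) = false ∧ pvGet2 land row col = 1 then
    let r := pvFloodLoop land n m [(row, col)] 0 (PySem.Set.add st.1 (row, col)) (n * m + 1)
    let cols := r.1.map (fun p => p.2)
    let s := (PySem.List.min? cols (fun x => x)).getD 0
    let e := (PySem.List.max? cols (fun x => x)).getD 0
    let cnt : Int := r.1.length
    (r.2, (st.2.modify s (· + cnt)).modify (e + 1) (· - cnt))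
  else st

def solution_alt (land : List (List Int)) : Int :=
  let n := land.length
  let m := (land.headD []).length
  let res := (List.range m).foldl (fun st col =>
      (List.range n).foldl (fun st row => pvScanB land n m st col row) st)
    ((PySem.Set.empty : PySem.Set (Nat × Nat)), List.replicate (m + 1) (0 : Int))
  let pre := (List.range m).foldl (fun (st : List Int × Int) j =>
      let run := st.2 + res.2.getD j 0
      (st.1 ++ [run], run)) ([], 0)
  (PySem.List.max? pre.1 (fun x => x)).getD 0

-- ===== PRECONDITION & SPEC =====
-- Pre_ excludes exactly the inputs on which A raises: empty land (IndexError on land[0]),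
-- an empty first row (max() of an empty list), and a row shorter than the first row
-- (IndexError on land[row][col] during the scan).
def Pre_solution (land : List (List Int)) : Prop :=
  land ≠ [] ∧ (land.headD []).length ≠ 0 ∧ ∀ row ∈ land, (land.headD []).length ≤ row.length
instance (land : List (List Int)) : Decidable (Pre_solution land) := by unfold Pre_solution; infer_instance

def pvWitness_solution : List (List Int) := [[1, 0], [1, 1]]

def Spec_solution (land : List (List Int)) (out : Int) : Prop := out = solution_alt land
instance (land : List (List Int)) (out : Int) : Decidable (Spec_solution land out) := by unfold Spec_solution; infer_instance

-- ===== CLAIM (what is proved, stated in full; the proofs are below) =====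
def Claim_equal_solution : Prop := ∀ (land : List (List Int)), Dom_solution land → Pre_solution land → Spec_solution land (solution land)

-- ===== LEMMAS AND PROOFS =====

-- invariants of the BFS simulation
def pvShape (n m : Nat) (v : List (List Bool)) : Prop := v.length = n ∧ ∀ r ∈ v, r.length = m
def pvRel (n m : Nat) (v : List (List Bool)) (s : List (Nat × Nat)) : Prop :=
  ∀ i j, i < n → j < m → pvVGet v i j = decide ((i, j) ∈ s)
def pvInR (n m : Nat) (q : List (Nat × Nat)) : Prop := ∀ p ∈ q, p.1 < n ∧ p.2 < m
def pvCellsL (n m : Nat) : List (Nat × Nat) := (List.range n).flatMap (fun i => (List.range m).map (fun j => (i, j)))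
def pvUnvis (n m : Nat) (s : List (Nat × Nat)) : Nat := (pvCellsL n m).countP (fun p => decide (p ∉ s))

lemma pvShape_vset {n m : Nat} {v : List (List Bool)} (h : pvShape n m v) (i j : Nat) :
    pvShape n m (pvVSet v i j) := by
  obtain ⟨hlen, hrow⟩ := h
  unfold pvVSet
  refine ⟨by simp [List.length_modify, hlen], ?_⟩
  intro r hr
  rw [List.mem_iff_getElem] at hr
  obtain ⟨k, hk, rfl⟩ := hr
  rw [List.getElem_modify]
  split
  · rw [List.length_set]
    exact hrow _ (List.getElem_mem _)
  · exact hrow _ (List.getElem_mem _)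

lemma pvVGet_vset {n m : Nat} {v : List (List Bool)} (h : pvShape n m v)
    {i j : Nat} (hi : i < n) (hj : j < m) (i' j' : Nat) :
    pvVGet (pvVSet v i j) i' j' = if i' = i ∧ j' = j then true else pvVGet v i' j' := by
  obtain ⟨hlen, hrow⟩ := h
  unfold pvVGet pvVSet
  by_cases hii : i' = i
  · subst hii
    have hiv : i' < v.length := by omega
    have hrl : (v[i']).length = m := hrow _ (List.getElem_mem hiv)
    have h1 : (v.modify i' (fun r => r.set j true)).getD i' [] = v[i'].set j true := by
      rw [List.getD_eq_getElem _ _ (by simpa [List.length_modify] using hiv), List.getElem_modify]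
      simp
    rw [h1]
    by_cases hjj : j' = j
    · subst hjj
      rw [List.getD_eq_getElem _ _ (by rw [List.length_set]; omega), List.getElem_set]
      simp
    · rcases Nat.lt_or_ge j' (v[i']).length with hj' | hj'
      · have e1 : (v[i'].set j true).getD j' false = (v[i'].set j true)[j']'(by rw [List.length_set]; omega) :=
          List.getD_eq_getElem _ _ _
        have e2 : (v.getD i' []).getD j' false = v[i'][j'] := by
          rw [List.getD_eq_getElem _ _ hiv, List.getD_eq_getElem _ _ hj']
        have hne : ¬ (j = j') := fun h => hjj h.symm
        rw [e1, e2, List.getElem_set, if_neg hne]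
        simp [hjj]
      · have e1 : (v[i'].set j true).getD j' false = false := by
          rw [List.getD_eq_getElem?_getD, List.getElem?_eq_none (by rw [List.length_set]; omega)]
          rfl
        have e2 : (v.getD i' []).getD j' false = false := by
          rw [List.getD_eq_getElem _ _ hiv, List.getD_eq_getElem?_getD,
              List.getElem?_eq_none (by omega)]
          rfl
        rw [e1, e2]
        simp [hjj]
  · have h1 : (v.modify i (fun r => r.set j true)).getD i' [] = v.getD i' [] := by
      rcases Nat.lt_or_ge i' v.length with hiv | hiv
      · have hne : ¬ (i = i') := fun h => hii h.symm
        rw [List.getD_eq_getElem _ _ (by simpa [List.length_modify] using hiv),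
            List.getElem_modify, List.getD_eq_getElem _ _ hiv, if_neg hne]
      · have e1 : (v.modify i (fun r => r.set j true)).getD i' [] = ([] : List Bool) := by
          rw [List.getD_eq_getElem?_getD, List.getElem?_eq_none (by simpa [List.length_modify] using hiv)]
          rfl
        have e2 : v.getD i' [] = ([] : List Bool) := by
          rw [List.getD_eq_getElem?_getD, List.getElem?_eq_none (by omega)]
          rfl
        rw [e1, e2]
    rw [h1]
    simp [hii]

lemma pvRel_add {n m : Nat} {v : List (List Bool)} {s : List (Nat × Nat)}
    (hsh : pvShape n m v) (hrel : pvRel n m v s) {i j : Nat} (hi : i < n) (hj : j < m) :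
    pvRel n m (pvVSet v i j) (PySem.Set.add s (i, j)) := by
  intro i' j' hi' hj'
  rw [pvVGet_vset hsh hi hj]
  by_cases hij : i' = i ∧ j' = j
  · obtain ⟨rfl, rfl⟩ := hij
    simp [PySem.Set.mem_add]
  · rw [if_neg hij, hrel i' j' hi' hj']
    have heq : (((i', j') : Nat × Nat) = (i, j)) ↔ (i' = i ∧ j' = j) := by
      simp [Prod.ext_iff]
    simp [PySem.Set.mem_add, heq, hij]

lemma pvMem_cellsL {n m i j : Nat} : (i, j) ∈ pvCellsL n m ↔ i < n ∧ j < m := by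
  simp only [pvCellsL, List.mem_flatMap, List.mem_map, List.mem_range, Prod.mk.injEq]
  constructor
  · rintro ⟨a, ha, b, hb, rfl, rfl⟩
    exact ⟨ha, hb⟩
  · rintro ⟨h1, h2⟩
    exact ⟨i, h1, j, h2, rfl, rfl⟩

lemma pvCellsL_length (n m : Nat) : (pvCellsL n m).length = n * m := by
  simp [pvCellsL, List.length_flatMap, List.length_map, List.length_range, List.map_const',
        List.sum_replicate, smul_eq_mul]

lemma pvUnvis_le (n m : Nat) (s : List (Nat × Nat)) : pvUnvis n m s ≤ n * m := by
  rw [pvUnvis, ← pvCellsL_length n m]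
  exact List.countP_le_length

lemma pvCountP_le {α : Type} (p q : α → Bool) (l : List α)
    (hmono : ∀ a ∈ l, p a = true → q a = true) : l.countP p ≤ l.countP q := by
  induction l with
  | nil => simp
  | cons a t ih =>
    rw [List.countP_cons, List.countP_cons]
    have h1 := ih (fun b hb h => hmono b (List.mem_cons_of_mem _ hb) h)
    by_cases h : p a = true
    · rw [if_pos h, if_pos (hmono a List.mem_cons_self h)]
      omega
    · rw [if_neg h]
      have h2 : (if q a = true then 1 else 0) = 1 ∨ (if q a = true then 1 else 0) = 0 := by
        split
        · exact Or.inl rfl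
        · exact Or.inr rfl
      omega

lemma pvCountP_lt {α : Type} (p q : α → Bool) (l : List α)
    (hmono : ∀ a ∈ l, p a = true → q a = true)
    (x : α) (hx : x ∈ l) (hpx : p x = false) (hqx : q x = true) :
    l.countP p < l.countP q := by
  induction l with
  | nil => cases hx
  | cons a t ih =>
    rw [List.countP_cons, List.countP_cons]
    rcases List.mem_cons.mp hx with rfl | hx'
    · have h1 := pvCountP_le p q t (fun b hb h => hmono b (List.mem_cons_of_mem _ hb) h)
      have hp' : ¬ (p x = true) := by simp [hpx]
      rw [if_neg hp', if_pos hqx]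
      omega
    · have h1 := ih (fun b hb h => hmono b (List.mem_cons_of_mem _ hb) h) hx'
      have h2 : (if p a = true then 1 else 0) ≤ (if q a = true then 1 else 0) := by
        by_cases h : p a = true
        · rw [if_pos h, if_pos (hmono a List.mem_cons_self h)]
        · rw [if_neg h]
          split <;> omega
      omega

lemma pvUnvis_add_lt {n m i j : Nat} {s : PySem.Set (Nat × Nat)}
    (hi : i < n) (hj : j < m) (hns : (i, j) ∉ s) :
    pvUnvis n m (PySem.Set.add s (i, j)) < pvUnvis n m s := by
  unfold pvUnvis
  apply pvCountP_lt _ _ _ ?_ (i, j) (pvMem_cellsL.mpr ⟨hi, hj⟩) (by simp [PySem.Set.mem_add]) (by simp [hns])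
  intro a ha h
  simp only [decide_eq_true_eq] at h ⊢
  intro hmem
  exact h ((PySem.Set.mem_add s (i, j) a).mpr (Or.inl hmem))

-- the bundle carried across the four neighbour blocks
def pvBundle (n m i : Nat) (bq0 : List (Nat × Nat)) (cnt0 : Int) (K : Nat)
    (a : List (Nat × Nat) × List (List Bool) × Int)
    (b : List (Nat × Nat) × PySem.Set (Nat × Nat)) : Prop :=
  a.1 = b.1.drop (i + 1) ∧ pvShape n m a.2.1 ∧ pvRel n m a.2.1 b.2 ∧ pvInR n m b.1 ∧
  i + 1 ≤ b.1.length ∧ (∃ t, b.1 = bq0 ++ t) ∧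
  a.2.2 = cnt0 + ((b.1.length : Int) - (bq0.length : Int)) ∧
  pvUnvis n m b.2 + (b.1.length - (i + 1)) ≤ K

-- one neighbour block of A against one direction step of B, generically
lemma pvStep_bundle {n m i : Nat} {land : List (List Int)} {bq0 : List (Nat × Nat)} {cnt0 : Int} {K : Nat}
    {a : List (Nat × Nat) × List (List Bool) × Int} {b : List (Nat × Nat) × PySem.Set (Nat × Nat)}
    (hb : pvBundle n m i bq0 cnt0 K a b)
    (g : Prop) [Decidable g] {ni nj : Nat} (hni : g → ni < n) (hnj : g → nj < m) :
    pvBundle n m i bq0 cnt0 K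
      (if g ∧ pvVGet a.2.1 ni nj = false ∧ pvGet2 land ni nj = 1 then
        (a.1 ++ [(ni, nj)], pvVSet a.2.1 ni nj, a.2.2 + 1) else a)
      (if g ∧ (ni, nj) ∉ b.2 ∧ pvGet2 land ni nj = 1 then
        (b.1 ++ [(ni, nj)], PySem.Set.add b.2 (ni, nj)) else b) := by
  obtain ⟨hdrop, hsh, hrel, hinr, hlen, ⟨t0, ht0⟩, hcnt, hK⟩ := hb
  by_cases hg : g
  · have hni' := hni hg
    have hnj' := hnj hg
    have hv : pvVGet a.2.1 ni nj = decide ((ni, nj) ∈ b.2) := hrel ni nj hni' hnj'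
    have hcd : (g ∧ pvVGet a.2.1 ni nj = false ∧ pvGet2 land ni nj = 1) ↔
        (g ∧ (ni, nj) ∉ b.2 ∧ pvGet2 land ni nj = 1) := by
      rw [hv]; simp
    rw [if_congr hcd rfl rfl]
    by_cases hc : g ∧ (ni, nj) ∉ b.2 ∧ pvGet2 land ni nj = 1
    · rw [if_pos hc, if_pos hc]
      obtain ⟨-, hmem, -⟩ := hc
      refine ⟨?_, pvShape_vset hsh _ _, pvRel_add hsh hrel hni' hnj', ?_, ?_, ?_, ?_, ?_⟩
      · show a.1 ++ [(ni, nj)] = (b.1 ++ [(ni, nj)]).drop (i + 1)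
        rw [List.drop_append_of_le_length hlen, hdrop]
      · intro p hp
        rcases List.mem_append.mp hp with h | h
        · exact hinr p h
        · simp only [List.mem_singleton] at h
          subst h
          exact ⟨hni', hnj'⟩
      · simp only [List.length_append, List.length_cons, List.length_nil]
        omega
      · exact ⟨t0 ++ [(ni, nj)], by rw [ht0, List.append_assoc]⟩
      · show a.2.2 + 1 = cnt0 + (((b.1 ++ [(ni, nj)]).length : Int) - (bq0.length : Int))
        rw [hcnt]
        simp only [List.length_append, List.length_cons, List.length_nil]
        push_cast
        ring
      · have hlt := pvUnvis_add_lt hni' hnj' hmem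
        simp only [List.length_append, List.length_cons, List.length_nil]
        omega
    · rw [if_neg hc, if_neg hc]
      exact ⟨hdrop, hsh, hrel, hinr, hlen, ⟨t0, ht0⟩, hcnt, hK⟩
  · rw [if_neg (fun h => hg h.1), if_neg (fun h => hg h.1)]
    exact ⟨hdrop, hsh, hrel, hinr, hlen, ⟨t0, ht0⟩, hcnt, hK⟩

-- B's direction step, rewritten with the direction resolved
lemma pvFloodStep_eq (land : List (List Int)) {n m : Nat} (ci cj : Nat)
    (d : Int × Int) (g : Prop) [Decidable g] (ni nj : Nat)
    (h1 : g ↔ (0 ≤ (ci : Int) + d.1 ∧ (ci : Int) + d.1 < (n : Int) ∧ 0 ≤ (cj : Int) + d.2 ∧ (cj : Int) + d.2 < (m : Int)))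
    (h2 : g → ((ci : Int) + d.1).toNat = ni ∧ ((cj : Int) + d.2).toNat = nj)
    (b : List (Nat × Nat) × PySem.Set (Nat × Nat)) :
    pvFloodStep land n m ci cj b d =
      if g ∧ (ni, nj) ∉ b.2 ∧ pvGet2 land ni nj = 1 then
        (b.1 ++ [(ni, nj)], PySem.Set.add b.2 (ni, nj)) else b := by
  unfold pvFloodStep
  by_cases hg : g
  · obtain ⟨e1, e2⟩ := h2 hg
    obtain ⟨c1, c2, c3, c4⟩ := h1.mp hg
    rw [e1, e2]
    have hcb : PySem.Set.contains b.2 (ni, nj) = false ↔ (ni, nj) ∉ b.2 := by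
      rw [← PySem.Set.contains_iff b.2 (ni, nj)]
      cases PySem.Set.contains b.2 (ni, nj) <;> simp
    have hcd : (0 ≤ (ci : Int) + d.1 ∧ (ci : Int) + d.1 < (n : Int) ∧ 0 ≤ (cj : Int) + d.2 ∧ (cj : Int) + d.2 < (m : Int) ∧
        PySem.Set.contains b.2 (ni, nj) = false ∧ pvGet2 land ni nj = 1) ↔
        (g ∧ (ni, nj) ∉ b.2 ∧ pvGet2 land ni nj = 1) := by
      constructor
      · rintro ⟨-, -, -, -, h5, h6⟩
        exact ⟨hg, hcb.mp h5, h6⟩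
      · rintro ⟨-, h5, h6⟩
        exact ⟨c1, c2, c3, c4, hcb.mpr h5, h6⟩
    exact if_congr hcd rfl rfl
  · rw [if_neg (fun h => hg (h1.mpr ⟨h.1, h.2.1, h.2.2.1, h.2.2.2.1⟩)), if_neg (fun h => hg h.1)]

-- the four instantiated direction steps
lemma pvUp_bundle {n m i : Nat} {land : List (List Int)} {bq0 : List (Nat × Nat)} {cnt0 : Int} {K : Nat}
    {a : List (Nat × Nat) × List (List Bool) × Int} {b : List (Nat × Nat) × PySem.Set (Nat × Nat)}
    (hb : pvBundle n m i bq0 cnt0 K a b) {ci cj : Nat} (hci : ci < n) (hcj : cj < m) :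
    pvBundle n m i bq0 cnt0 K (pvUpA land ci cj a) (pvFloodStep land n m ci cj b (-1, 0)) := by
  rw [pvFloodStep_eq land ci cj (-1, 0) (1 ≤ ci) (ci - 1) cj
    (by simp only []; omega) (fun hg => by simp only []; omega) b]
  exact pvStep_bundle hb (1 ≤ ci) (fun _ => by omega) (fun _ => hcj)

lemma pvRight_bundle {n m i : Nat} {land : List (List Int)} {bq0 : List (Nat × Nat)} {cnt0 : Int} {K : Nat}
    {a : List (Nat × Nat) × List (List Bool) × Int} {b : List (Nat × Nat) × PySem.Set (Nat × Nat)}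
    (hb : pvBundle n m i bq0 cnt0 K a b) {ci cj : Nat} (hci : ci < n) (hcj : cj < m) :
    pvBundle n m i bq0 cnt0 K (pvRightA land m ci cj a) (pvFloodStep land n m ci cj b (0, 1)) := by
  rw [pvFloodStep_eq land ci cj (0, 1) (cj + 1 < m) ci (cj + 1)
    (by simp only []; omega) (fun hg => by simp only []; omega) b]
  exact pvStep_bundle hb (cj + 1 < m) (fun _ => hci) (fun h => h)

lemma pvDown_bundle {n m i : Nat} {land : List (List Int)} {bq0 : List (Nat × Nat)} {cnt0 : Int} {K : Nat}
    {a : List (Nat × Nat) × List (List Bool) × Int} {b : List (Nat × Nat) × PySem.Set (Nat × Nat)}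
    (hb : pvBundle n m i bq0 cnt0 K a b) {ci cj : Nat} (hci : ci < n) (hcj : cj < m) :
    pvBundle n m i bq0 cnt0 K (pvDownA land n ci cj a) (pvFloodStep land n m ci cj b (1, 0)) := by
  rw [pvFloodStep_eq land ci cj (1, 0) (ci + 1 < n) (ci + 1) cj
    (by simp only []; omega) (fun hg => by simp only []; omega) b]
  exact pvStep_bundle hb (ci + 1 < n) (fun h => h) (fun _ => hcj)

lemma pvLeft_bundle {n m i : Nat} {land : List (List Int)} {bq0 : List (Nat × Nat)} {cnt0 : Int} {K : Nat}
    {a : List (Nat × Nat) × List (List Bool) × Int} {b : List (Nat × Nat) × PySem.Set (Nat × Nat)}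
    (hb : pvBundle n m i bq0 cnt0 K a b) {ci cj : Nat} (hci : ci < n) (hcj : cj < m) :
    pvBundle n m i bq0 cnt0 K (pvLeftA land ci cj a) (pvFloodStep land n m ci cj b (0, -1)) := by
  rw [pvFloodStep_eq land ci cj (0, -1) (1 ≤ cj) ci (cj - 1)
    (by simp only []; omega) (fun hg => by simp only []; omega) b]
  exact pvStep_bundle hb (1 ≤ cj) (fun _ => hci) (fun _ => by omega)

-- the main simulation: A's bfs while-loop against B's flood loop, in lockstep
lemma pvFlood_sim (land : List (List Int)) (n m : Nat) :
    ∀ fuel (bq : List (Nat × Nat)) (i : Nat) (v : List (List Bool)) (s : PySem.Set (Nat × Nat))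
      (st en : Nat) (cnt : Int),
    pvShape n m v → pvRel n m v s → pvInR n m bq → i ≤ bq.length →
    pvUnvis n m s + (bq.length - i) ≤ fuel →
    (pvBfsLoop land n m v (bq.drop i) st en cnt fuel).1
        = (List.foldl min st (((pvFloodLoop land n m bq i s fuel).1.drop i).map (fun p => p.2)),
           List.foldl max en (((pvFloodLoop land n m bq i s fuel).1.drop i).map (fun p => p.2)),
           cnt + (((pvFloodLoop land n m bq i s fuel).1.length : Int) - (bq.length : Int)))
      ∧ pvRel n m (pvBfsLoop land n m v (bq.drop i) st en cnt fuel).2 (pvFloodLoop land n m bq i s fuel).2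
      ∧ pvShape n m (pvBfsLoop land n m v (bq.drop i) st en cnt fuel).2
      ∧ pvInR n m (pvFloodLoop land n m bq i s fuel).1
      ∧ ∃ t, (pvFloodLoop land n m bq i s fuel).1 = bq ++ t := by
  intro fuel
  induction fuel with
  | zero =>
    intro bq i v s st en cnt hsh hrel hinr hile hfuel
    have hdrop : bq.drop i = [] := List.drop_eq_nil_of_le (by omega)
    rw [hdrop]
    simp only [pvBfsLoop, pvFloodLoop]
    refine ⟨?_, hrel, hsh, hinr, [], by simp⟩
    simp [hdrop]
  | succ fuel ih =>
    intro bq i v s st en cnt hsh hrel hinr hile hfuel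
    by_cases hi : i < bq.length
    · rcases hbqi : bq[i] with ⟨ci, cj⟩
      have hcicj := hinr bq[i] (List.getElem_mem hi)
      rw [hbqi] at hcicj
      have hci : ci < n := hcicj.1
      have hcj : cj < m := hcicj.2
      have hdropc : bq.drop i = (ci, cj) :: bq.drop (i + 1) := by
        rw [List.drop_eq_getElem_cons hi, hbqi]
      have hbun0 : pvBundle n m i bq cnt fuel (bq.drop (i + 1), v, cnt) (bq, s) := by
        refine ⟨rfl, hsh, hrel, hinr, ?_, ⟨[], by simp⟩, ?_, ?_⟩
        · show i + 1 ≤ bq.length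
          omega
        · show cnt = cnt + ((bq.length : Int) - (bq.length : Int))
          simp
        · show pvUnvis n m s + (bq.length - (i + 1)) ≤ fuel
          omega
      have hb1 := pvUp_bundle (land := land) hbun0 hci hcj
      have hb2 := pvRight_bundle (land := land) hb1 hci hcj
      have hb3 := pvDown_bundle (land := land) hb2 hci hcj
      have hb4 := pvLeft_bundle (land := land) hb3 hci hcj
      obtain ⟨hdrop4, hsh4, hrel4, hinr4, hlen4, ⟨t4, ht4⟩, hcnt4, hK4⟩ := hb4
      have hfl : pvFloodLoop land n m bq i s (fuel + 1) =
          pvFloodLoop land n m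
            (pvFloodStep land n m ci cj (pvFloodStep land n m ci cj (pvFloodStep land n m ci cj
              (pvFloodStep land n m ci cj (bq, s) (-1, 0)) (0, 1)) (1, 0)) (0, -1)).1 (i + 1)
            (pvFloodStep land n m ci cj (pvFloodStep land n m ci cj (pvFloodStep land n m ci cj
              (pvFloodStep land n m ci cj (bq, s) (-1, 0)) (0, 1)) (1, 0)) (0, -1)).2 fuel := by
        simp only [pvFloodLoop]
        rw [if_pos hi, List.getD_eq_getElem _ _ hi, hbqi]
        simp only [pvDirs, List.foldl_cons, List.foldl_nil]
      rw [hfl, hdropc]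
      simp only [pvBfsLoop]
      set A4 := pvLeftA land ci cj (pvDownA land n ci cj (pvRightA land m ci cj
        (pvUpA land ci cj (bq.drop (i + 1), v, cnt)))) with hA4
      set B4 := pvFloodStep land n m ci cj (pvFloodStep land n m ci cj (pvFloodStep land n m ci cj
        (pvFloodStep land n m ci cj (bq, s) (-1, 0)) (0, 1)) (1, 0)) (0, -1) with hB4
      have hrec := ih B4.1 (i + 1) A4.2.1 B4.2 (if cj < st then cj else st) (if en < cj then cj else en)
        A4.2.2 hsh4 hrel4 hinr4 hlen4 hK4
      rw [hdrop4]
      obtain ⟨hstats, hrelF, hshF, hinrF, ⟨t5, ht5⟩⟩ := hrec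
      have hQ : (pvFloodLoop land n m B4.1 (i + 1) B4.2 fuel).1 = bq ++ (t4 ++ t5) := by
        rw [ht5, ht4, List.append_assoc]
      have hQlen : bq.length ≤ (pvFloodLoop land n m B4.1 (i + 1) B4.2 fuel).1.length := by
        rw [hQ, List.length_append]
        omega
      have e1 : (pvFloodLoop land n m B4.1 (i + 1) B4.2 fuel).1[i]'(by omega) = (ci, cj) := by
        rw [List.getElem_eq_iff, hQ, List.getElem?_append_left hi, List.getElem?_eq_getElem hi, hbqi]
      have hQdrop : (pvFloodLoop land n m B4.1 (i + 1) B4.2 fuel).1.drop i =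
          (ci, cj) :: (pvFloodLoop land n m B4.1 (i + 1) B4.2 fuel).1.drop (i + 1) := by
        rw [List.drop_eq_getElem_cons (by omega), e1]
      refine ⟨?_, hrelF, hshF, hinrF, t4 ++ t5, hQ⟩
      rw [hstats, hQdrop]
      simp only [List.map_cons, List.foldl_cons]
      have hmineq : (if cj < st then cj else st) = min st cj := by
        split <;> omega
      have hmaxeq : (if en < cj then cj else en) = max en cj := by
        split <;> omega
      rw [hmineq, hmaxeq]
      simp only [Prod.mk.injEq]
      refine ⟨trivial, trivial, ?_⟩
      rw [hcnt4]
      ring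
    · have hieq : bq.drop i = [] := List.drop_eq_nil_of_le (by omega)
      rw [hieq]
      simp only [pvBfsLoop, pvFloodLoop]
      rw [if_neg hi]
      refine ⟨?_, hrel, hsh, hinr, [], by simp⟩
      simp [hieq]

-- difference array of a group list
def pvDiffOf (m : Nat) (oil : List (Nat × Nat × Int)) : List Int :=
  oil.foldl (fun d g => (d.modify g.1 (· + g.2.2)).modify (g.2.1 + 1) (· - g.2.2))
    (List.replicate (m + 1) (0 : Int))

-- relation between the two outer-scan states
def pvORel (land : List (List Int)) (n m : Nat)
    (a : List (List Bool) × List (Nat × Nat × Int))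
    (b : PySem.Set (Nat × Nat) × List Int) : Prop :=
  pvShape n m a.1 ∧ pvRel n m a.1 b.1 ∧ b.2 = pvDiffOf m a.2 ∧
  ∀ g ∈ a.2, g.1 ≤ g.2.1 ∧ g.2.1 < m

lemma pvFoldl_rel {α β γ : Type} (R : β → γ → Prop) (f : β → α → β) (g : γ → α → γ)
    (l : List α) : ∀ s t, R s t → (∀ x ∈ l, ∀ s t, R s t → R (f s x) (g t x)) →
    R (l.foldl f s) (l.foldl g t) := by
  induction l with
  | nil => intro s t h _; exact h
  | cons x xs ih =>
    intro s t h hstep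
    exact ih _ _ (hstep x (by simp) s t h) (fun y hy => hstep y (by simp [hy]))

lemma pvFoldl_min_le (l : List Nat) : ∀ a : Nat, List.foldl min a l ≤ a := by
  induction l with
  | nil => intro a; simp
  | cons x t ih =>
    intro a
    calc List.foldl min (min a x) t ≤ min a x := ih (min a x)
    _ ≤ a := min_le_left _ _

lemma pvLe_foldl_max (l : List Nat) : ∀ a : Nat, a ≤ List.foldl max a l := by
  induction l with
  | nil => intro a; simp
  | cons x t ih =>
    intro a
    calc a ≤ max a x := le_max_left _ _
    _ ≤ List.foldl max (max a x) t := ih (max a x)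

lemma pvFoldl_max_lt {m : Nat} (l : List Nat) : ∀ a : Nat, a < m → (∀ x ∈ l, x < m) →
    List.foldl max a l < m := by
  induction l with
  | nil => intro a ha _; simpa using ha
  | cons x t ih =>
    intro a ha hl
    simp only [List.foldl_cons]
    exact ih (max a x) (max_lt ha (hl x (by simp))) (fun y hy => hl y (by simp [hy]))

lemma pvScan_step (land : List (List Int)) (n m : Nat) (col row : Nat)
    (hrow : row < n) (hcol : col < m)
    (a : List (List Bool) × List (Nat × Nat × Int)) (b : PySem.Set (Nat × Nat) × List Int)
    (h : pvORel land n m a b) :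
    pvORel land n m (pvScanA land n m a col row) (pvScanB land n m b col row) := by
  obtain ⟨hsh, hrel, hdiff, hg⟩ := h
  simp only [pvScanA, pvScanB, pvBfsA]
  have hcb : PySem.Set.contains b.1 (row, col) = false ↔ (row, col) ∉ b.1 := by
    rw [← PySem.Set.contains_iff b.1 (row, col)]
    cases PySem.Set.contains b.1 (row, col) <;> simp
  have hcd : (PySem.Set.contains b.1 (row, col) = false ∧ pvGet2 land row col = 1) ↔
      (pvVGet a.1 row col = false ∧ pvGet2 land row col = 1) := by
    rw [hrel row col hrow hcol, hcb]
    simp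
  rw [if_congr hcd rfl rfl]
  by_cases hc : pvVGet a.1 row col = false ∧ pvGet2 land row col = 1
  · rw [if_pos hc, if_pos hc]
    have hsim := pvFlood_sim land n m (n * m + 1) [(row, col)] 0 (pvVSet a.1 row col)
      (PySem.Set.add b.1 (row, col)) col col 1
      (pvShape_vset hsh _ _)
      (pvRel_add hsh hrel hrow hcol)
      (by intro p hp; simp only [List.mem_singleton] at hp; subst hp; exact ⟨hrow, hcol⟩)
      (by simp)
      (by have := pvUnvis_le n m (PySem.Set.add b.1 (row, col)); simp only [List.length_cons, List.length_nil]; omega)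
    simp only [List.drop_zero] at hsim
    obtain ⟨hstats, hrelF, hshF, hinrF, ⟨t, ht⟩⟩ := hsim
    set Q := pvFloodLoop land n m [(row, col)] 0 (PySem.Set.add b.1 (row, col)) (n * m + 1) with hQdef
    have hQ1 : Q.1 = (row, col) :: t := by
      rw [ht]; simp
    have hcols : Q.1.map (fun p => p.2) = col :: t.map (fun p => p.2) := by
      rw [hQ1]; simp
    have hmin : (PySem.List.min? (Q.1.map (fun p => p.2)) (fun x => x)).getD 0 =
        List.foldl min col (t.map (fun p => p.2)) := by
      rw [hcols, PySem.List.min?_id_cons]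
      rfl
    have hmax : (PySem.List.max? (Q.1.map (fun p => p.2)) (fun x => x)).getD 0 =
        List.foldl max col (t.map (fun p => p.2)) := by
      rw [hcols, PySem.List.max?_id_cons]
      rfl
    have hstats' : (pvBfsLoop land n m (pvVSet a.1 row col) [(row, col)] col col 1 (n * m + 1)).1
        = ((PySem.List.min? (Q.1.map (fun p => p.2)) (fun x => x)).getD 0,
           (PySem.List.max? (Q.1.map (fun p => p.2)) (fun x => x)).getD 0,
           (Q.1.length : Int)) := by
      rw [hstats, hcols, PySem.List.min?_id_cons, PySem.List.max?_id_cons]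
      simp only [List.foldl_cons, min_self, max_self, Option.getD_some, List.length_cons,
        List.length_nil, Prod.mk.injEq, true_and]
      push_cast
      omega
    rw [hstats']
    refine ⟨hshF, hrelF, ?_, ?_⟩
    · have hconc : pvDiffOf m (a.2 ++
          [((PySem.List.min? (Q.1.map (fun p => p.2)) (fun x => x)).getD 0,
            (PySem.List.max? (Q.1.map (fun p => p.2)) (fun x => x)).getD 0,
            (Q.1.length : Int))]) =
          ((pvDiffOf m a.2).modify ((PySem.List.min? (Q.1.map (fun p => p.2)) (fun x => x)).getD 0)
            (· + (Q.1.length : Int))).modify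
            ((PySem.List.max? (Q.1.map (fun p => p.2)) (fun x => x)).getD 0 + 1)
            (· - (Q.1.length : Int)) := by
        unfold pvDiffOf
        simp only [List.foldl_append, List.foldl_cons, List.foldl_nil]
      rw [hconc, hdiff]
    · intro g' hg'
      rcases List.mem_append.mp hg' with h' | h'
      · exact hg g' h'
      · simp only [List.mem_singleton] at h'
        subst h'
        refine ⟨?_, ?_⟩
        · show (PySem.List.min? (Q.1.map (fun p => p.2)) (fun x => x)).getD 0 ≤
            (PySem.List.max? (Q.1.map (fun p => p.2)) (fun x => x)).getD 0
          rw [hmin, hmax]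
          calc List.foldl min col (t.map (fun p => p.2)) ≤ col := pvFoldl_min_le _ col
          _ ≤ List.foldl max col (t.map (fun p => p.2)) := pvLe_foldl_max _ col
        · show (PySem.List.max? (Q.1.map (fun p => p.2)) (fun x => x)).getD 0 < m
          rw [hmax]
          apply pvFoldl_max_lt _ col hcol
          intro x hx
          rw [List.mem_map] at hx
          obtain ⟨p, hp, rfl⟩ := hx
          exact (hinrF p (by rw [hQ1]; exact List.mem_cons_of_mem _ hp)).2
  · rw [if_neg hc, if_neg hc]
    exact ⟨hsh, hrel, hdiff, hg⟩

-- pointwise getD of a modify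
lemma pvModify_getD (d : List Int) (k j : Nat) (f : Int → Int) :
    (d.modify k f).getD j 0 = if j = k ∧ k < d.length then f (d.getD j 0) else d.getD j 0 := by
  rcases Nat.lt_or_ge j d.length with hj | hj
  · rw [List.getD_eq_getElem _ _ (by simpa [List.length_modify] using hj), List.getElem_modify,
        List.getD_eq_getElem _ _ hj]
    by_cases hjk : j = k
    · subst hjk
      simp [hj]
    · have hne : ¬ (k = j) := fun h => hjk h.symm
      rw [if_neg hne, if_neg (by omega : ¬ (j = k ∧ k < d.length))]
  · have e1 : (d.modify k f).getD j 0 = 0 := by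
      rw [List.getD_eq_getElem?_getD, List.getElem?_eq_none (by simpa [List.length_modify] using hj)]
      rfl
    have e2 : d.getD j 0 = 0 := by
      rw [List.getD_eq_getElem?_getD, List.getElem?_eq_none hj]
      rfl
    have hcnd : ¬ (j = k ∧ k < d.length) := by omega
    rw [e1, e2, if_neg hcnd]

lemma pvFoldModify_length (c : Int) (l : List Nat) : ∀ d : List Int,
    (l.foldl (fun d idx => d.modify idx (· + c)) d).length = d.length := by
  induction l with
  | nil => intro d; rfl
  | cons x t ih =>
    intro d
    simp only [List.foldl_cons]
    rw [ih, List.length_modify]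

lemma pvDrill_length (g : Nat × Nat × Int) (d : List Int) : (pvDrillA g d).length = d.length := by
  unfold pvDrillA
  exact pvFoldModify_length _ _ d

lemma pvDrillFold_length (oil : List (Nat × Nat × Int)) : ∀ d : List Int,
    (oil.foldl (fun d g => pvDrillA g d) d).length = d.length := by
  induction oil with
  | nil => intro d; rfl
  | cons g t ih =>
    intro d
    simp only [List.foldl_cons]
    rw [ih, pvDrill_length]

lemma pvDiffOf_length (m : Nat) (oil : List (Nat × Nat × Int)) : (pvDiffOf m oil).length = m + 1 := by
  unfold pvDiffOf
  have h : ∀ d : List Int, (oil.foldl (fun d (g : Nat × Nat × Int) =>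
      (d.modify g.1 (· + g.2.2)).modify (g.2.1 + 1) (· - g.2.2)) d).length = d.length := by
    induction oil with
    | nil => intro d; rfl
    | cons g t ih =>
      intro d
      simp only [List.foldl_cons]
      rw [ih, List.length_modify, List.length_modify]
  rw [h, List.length_replicate]

lemma pvDrill_getD (c : Int) : ∀ (len a : Nat) (d : List Int) (j : Nat),
    ((List.range' a len).foldl (fun d idx => d.modify idx (· + c)) d).getD j 0
      = d.getD j 0 + if a ≤ j ∧ j < a + len ∧ j < d.length then c else 0 := by
  intro len
  induction len with
  | zero =>
    intro a d j
    have hcnd : ¬ (a ≤ j ∧ j < a + 0 ∧ j < d.length) := by omega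
    rw [show List.range' a 0 = ([] : List Nat) from rfl, List.foldl_nil, if_neg hcnd, add_zero]
  | succ len ih =>
    intro a d j
    simp only [List.range'_succ, List.foldl_cons]
    rw [ih, List.length_modify, pvModify_getD]
    split_ifs <;> omega

lemma pvSum_take_modify (x : Int) : ∀ (d : List Int) (k t : Nat),
    ((d.modify k (· + x)).take t).sum = (d.take t).sum + if k < t ∧ k < d.length then x else 0 := by
  intro d
  induction d with
  | nil =>
    intro k t
    simp
  | cons y d ih =>
    intro k t
    rcases k with _ | k
    · have hm : (y :: d).modify 0 (· + x) = (y + x) :: d := by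
        rw [List.modify_cons]
        simp
      rcases t with _ | t
      · simp [hm]
      · rw [hm]
        simp only [List.take_succ_cons, List.sum_cons, List.length_cons]
        have hcnd : (0 < t + 1 ∧ 0 < d.length + 1) := by omega
        rw [if_pos hcnd]
        ring
    · have hm : (y :: d).modify (k + 1) (· + x) = y :: d.modify k (· + x) := by
        rw [List.modify_cons]
        simp
      rcases t with _ | t
      · simp [hm]
      · rw [hm]
        simp only [List.take_succ_cons, List.sum_cons, List.length_cons]
        rw [ih k t]
        have hiff : (k < t ∧ k < d.length) ↔ (k + 1 < t + 1 ∧ k + 1 < d.length + 1) := by omega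
        rw [if_congr hiff rfl rfl]
        ring

lemma pvDrillA_getD (g : Nat × Nat × Int) (d : List Int) (j : Nat) :
    (pvDrillA g d).getD j 0
      = d.getD j 0 + if g.1 ≤ j ∧ j < g.1 + (g.2.1 + 1 - g.1) ∧ j < d.length then g.2.2 else 0 := by
  unfold pvDrillA
  exact pvDrill_getD g.2.2 (g.2.1 + 1 - g.1) g.1 d j

-- the drilled list agrees with the prefix sums of the difference array
lemma pvDrilled_eq_prefix (m : Nat) : ∀ (oil : List (Nat × Nat × Int)),
    (∀ g ∈ oil, g.1 ≤ g.2.1 ∧ g.2.1 < m) → ∀ j, j < m →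
    (oil.foldl (fun d g => pvDrillA g d) (List.replicate m (0 : Int))).getD j 0
      = ((pvDiffOf m oil).take (j + 1)).sum := by
  intro oil
  induction oil using List.reverseRecOn with
  | nil =>
    intro _ j hj
    rw [List.foldl_nil, List.getD_replicate _ hj]
    show (0 : Int) = ((pvDiffOf m []).take (j + 1)).sum
    unfold pvDiffOf
    rw [List.foldl_nil, List.take_replicate, List.sum_replicate]
    simp
  | append_singleton oil g ih =>
    intro hg j hj
    have hgg := hg g (by simp)
    have ihj := ih (fun g' hg' => hg g' (by simp [hg'])) j hj
    have hlenD : (oil.foldl (fun d g => pvDrillA g d) (List.replicate m (0 : Int))).length = m := by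
      rw [pvDrillFold_length, List.length_replicate]
    simp only [List.foldl_append, List.foldl_cons, List.foldl_nil]
    rw [pvDrillA_getD, hlenD, ihj]
    have hdd : pvDiffOf m (oil ++ [g]) =
        ((pvDiffOf m oil).modify g.1 (· + g.2.2)).modify (g.2.1 + 1) (· - g.2.2) := by
      unfold pvDiffOf
      simp only [List.foldl_append, List.foldl_cons, List.foldl_nil]
    rw [hdd]
    have hsub : ((pvDiffOf m oil).modify g.1 (· + g.2.2)).modify (g.2.1 + 1) (· - g.2.2)
        = ((pvDiffOf m oil).modify g.1 (· + g.2.2)).modify (g.2.1 + 1) (· + (-g.2.2)) := by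
      simp only [sub_eq_add_neg]
    rw [hsub, pvSum_take_modify, pvSum_take_modify]
    rw [List.length_modify, pvDiffOf_length]
    have h1 := hgg.1
    have h2 := hgg.2
    split_ifs <;> omega

-- B's running-sum loop produces exactly the prefix sums
lemma pvPrefix_loop (diff : List Int) : ∀ k : Nat, k ≤ diff.length →
    (List.range k).foldl (fun (st : List Int × Int) j =>
        let run := st.2 + diff.getD j 0
        (st.1 ++ [run], run)) ([], 0)
      = ((List.range k).map (fun j => (diff.take (j + 1)).sum), (diff.take k).sum) := by
  intro k
  induction k with
  | zero => intro _; simp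
  | succ k ih =>
    intro hk
    have hsum : (diff.take (k + 1)).sum = (diff.take k).sum + diff.getD k 0 := by
      rw [List.sum_take_succ diff k (by omega), List.getD_eq_getElem diff 0 (by omega)]
    rw [List.range_succ, List.foldl_append, List.foldl_cons, List.foldl_nil, ih (by omega)]
    simp [hsum]

-- initial state of the outer scan
lemma pvInit_rel (land : List (List Int)) (n m : Nat) :
    pvORel land n m
      ((List.range n).map (fun _ => (List.range m).map (fun _ => false)), [])
      ((PySem.Set.empty : PySem.Set (Nat × Nat)), List.replicate (m + 1) (0 : Int)) := by
  refine ⟨⟨by simp, ?_⟩, ?_, rfl, by simp⟩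
  · intro r hr
    rw [List.mem_map] at hr
    obtain ⟨x, -, rfl⟩ := hr
    simp
  · intro i j hi hj
    have h1 : ((List.range n).map (fun _ => (List.range m).map (fun _ => false))).getD i [] =
        (List.range m).map (fun _ => false) := by
      rw [List.getD_eq_getElem _ _ (by simpa using hi), List.getElem_map]
    show (((List.range n).map (fun _ => (List.range m).map (fun _ => false))).getD i []).getD j false = _
    rw [h1, List.getD_eq_getElem _ _ (by simpa using hj), List.getElem_map]
    simp [PySem.Set.empty]

-- ===== VERDICT (by name: the statement is the Claim_ definition above) =====
theorem solution_spec : Claim_equal_solution := by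
  unfold Claim_equal_solution
  intro land _ _
  unfold Spec_solution
  simp only [solution, solution_alt]
  have hO := pvFoldl_rel (pvORel land land.length (land.headD []).length)
    (fun st col => (List.range land.length).foldl
      (fun st row => pvScanA land land.length (land.headD []).length st col row) st)
    (fun st col => (List.range land.length).foldl
      (fun st row => pvScanB land land.length (land.headD []).length st col row) st)
    (List.range (land.headD []).length)
    ((List.range land.length).map (fun _ => (List.range (land.headD []).length).map (fun _ => false)), [])
    ((PySem.Set.empty : PySem.Set (Nat × Nat)), List.replicate ((land.headD []).length + 1) (0 : Int))
    (pvInit_rel land land.length (land.headD []).length)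
    (fun col hcol s t hst => pvFoldl_rel _ _ _ _ s t hst
      (fun row hrow s' t' hst' => pvScan_step land land.length (land.headD []).length col row
        (List.mem_range.mp hrow) (List.mem_range.mp hcol) s' t' hst'))
  obtain ⟨hshF, hrelF, hdiffF, hgF⟩ := hO
  simp only [hdiffF]
  rw [pvPrefix_loop _ _ (by rw [pvDiffOf_length]; omega)]
  have hlists : (((List.range (land.headD []).length).foldl
        (fun st col => (List.range land.length).foldl
          (fun st row => pvScanA land land.length (land.headD []).length st col row) st)
        ((List.range land.length).map (fun _ => (List.range (land.headD []).length).map (fun _ => false)), [])).2.foldl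
        (fun d g => pvDrillA g d) (List.replicate (land.headD []).length (0 : Int)))
      = (List.range (land.headD []).length).map (fun j =>
          ((pvDiffOf (land.headD []).length (((List.range (land.headD []).length).foldl
            (fun st col => (List.range land.length).foldl
              (fun st row => pvScanA land land.length (land.headD []).length st col row) st)
            ((List.range land.length).map (fun _ => (List.range (land.headD []).length).map (fun _ => false)), [])).2)).take (j + 1)).sum) := by
    apply List.ext_getElem
    · rw [pvDrillFold_length, List.length_replicate, List.length_map, List.length_range]
    · intro j h1 h2
      rw [List.getElem_map, List.getElem_range]
      have hjm : j < (land.headD []).length := by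
        rw [pvDrillFold_length, List.length_replicate] at h1
        exact h1
      rw [← List.getD_eq_getElem _ 0 h1]
      exact pvDrilled_eq_prefix (land.headD []).length _ hgF j hjm
  rw [hlists]
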